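-- pv_equiv track=rewrite | github.com/pokemonle/pokemonle-api | src/utils/gen.py | decode_gen
-- ===== SOURCE A (Python) =====
-- def decode_gen(gen: int) -> set[int]:
--     """Decodes an int into a set of integers."""
--     """ 11 => (1,2,4)"""
--     """ 76 => (3,4,7)"""
--     binary = bin(gen)[2:][::-1]  # Convert to binary and reverse the string
--     gens = set()
--     for i, bit in enumerate(binary):
--         if bit == '1':
--             gens.add(i + 1)  # Add 1 to the index to get the original integer
--     return gens
-- ===== SOURCE B (Python) =====
-- def decode_gen(gen: int) -> set[int]:
--     """Decodes an int into a set of integers (Kernighan: strip one set bit per step)."""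
--     gens = set()
--     while gen:
--         rest = gen & (gen - 1)                # clear the lowest set bit
--         gens.add((gen ^ rest).bit_length())   # 1-based position of that bit
--         gen = rest
--     return gens
-- ===== Notes on version B (the rewrite author's own statement) =====
-- stated objective: alternative
-- what changed: B uses Kernighan's trick: each iteration clears the lowest set bit with gen & (gen-1) and records its 1-based position via bit_length of the isolated bit, iterating once per set bit instead of scanning every character of a reversed binary string.
-- outside the precondition, e.g. on decode_gen(-5): A returns {1, 3}, B does not finish within the time limit
import Mathlib
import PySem

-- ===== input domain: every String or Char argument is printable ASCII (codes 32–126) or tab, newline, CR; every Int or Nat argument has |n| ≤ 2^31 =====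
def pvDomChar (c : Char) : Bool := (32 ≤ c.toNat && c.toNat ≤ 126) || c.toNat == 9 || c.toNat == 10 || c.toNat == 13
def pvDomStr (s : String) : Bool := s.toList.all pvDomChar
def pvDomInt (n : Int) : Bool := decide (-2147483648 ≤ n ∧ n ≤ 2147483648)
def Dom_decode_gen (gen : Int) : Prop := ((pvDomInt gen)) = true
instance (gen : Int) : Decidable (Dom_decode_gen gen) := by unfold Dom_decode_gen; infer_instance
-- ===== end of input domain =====

-- B decodes the set of 1-based bit positions by Kernighan's trick (clear lowest set bit with
-- gen & (gen-1), record its position via bit_length) instead of A's scan over the reversed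
-- binary string; objective: alternative algorithm (one step per SET bit), same asymptotic cost.


-- ===== PORT A =====
-- bin(n) for n ≥ 1 without the '0b' prefix: most-significant bit first (hand port, exact for n ≥ 1)
def pvBinDigits (n : Nat) : List Char :=
  if n = 0 then [] else pvBinDigits (n / 2) ++ [if n % 2 = 1 then '1' else '0']

-- bin(gen) as a list of characters (exact transliteration of CPython's bin() for ints)
def pvBin (gen : Int) : List Char :=
  if gen < 0 then '-' :: '0' :: 'b' :: (if (-gen).toNat = 0 then ['0'] else pvBinDigits (-gen).toNat)
  else '0' :: 'b' :: (if gen.toNat = 0 then ['0'] else pvBinDigits gen.toNat)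

-- string slicing [2:] = List.drop 2 and [::-1] = List.reverse on the character list (exact)
def decode_gen (gen : Int) : List Int :=
  let binary : List Char := ((pvBin gen).drop 2).reverse
  (PySem.List.enumerate binary).foldl
    (fun (gens : PySem.Set Int) (p : Int × Char) =>
      if p.2 = '1' then PySem.Set.add gens (p.1 + 1) else gens) []

-- ===== PORT B =====
-- 'while gen: rest = gen & (gen-1); gens.add((gen ^ rest).bit_length()); gen = rest' on the Nat
-- magnitude (Pre_ gives 0 ≤ gen, so Nat's &&&, ^^^ and '-' 1 agree with Python's on every loop
-- state; bit_length x = log2 x + 1 is exact since x = gen ^ rest ≥ 1 inside the loop)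
def pvLoopB (n : Nat) (gens : PySem.Set Int) : PySem.Set Int :=
  if h : n = 0 then gens
  else
    let rest := n &&& (n - 1)
    pvLoopB rest (PySem.Set.add gens (((n ^^^ rest).log2 : Int) + 1))
decreasing_by
  exact lt_of_le_of_lt Nat.and_le_right (by omega)

def decode_gen_alt (gen : Int) : List Int := pvLoopB gen.toNat []

-- ===== PRECONDITION & SPEC =====
-- Pre_ excludes negative gen: there A's slicing of the minus-prefixed binary string returns the
-- magnitude's decode, while B's natural 'while gen' bit loop does not terminate.
def Pre_decode_gen (gen : Int) : Prop := 0 ≤ gen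
instance (gen : Int) : Decidable (Pre_decode_gen gen) := by unfold Pre_decode_gen; infer_instance
def pvWitness_decode_gen : Int := (76)
def Spec_decode_gen (gen : Int) (out : List Int) : Prop := out = decode_gen_alt gen
instance (gen : Int) (out : List Int) : Decidable (Spec_decode_gen gen out) := by unfold Spec_decode_gen; infer_instance

-- ===== CLAIM =====
def Claim_equal_decode_gen : Prop :=
  ∀ (gen : Int), Dom_decode_gen gen → Pre_decode_gen gen → Spec_decode_gen gen (decode_gen gen)

-- ===== LEMMAS AND PROOFS =====
-- canonical list of 1-based set-bit positions of n, starting at index i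
def pvPos (n : Nat) (i : Int) : List Int :=
  if n = 0 then [] else (if n % 2 = 1 then [i] else []) ++ pvPos (n / 2) (i + 1)

theorem pvSet_add_append (gens : List Int) (i : Int) (h : ∀ x ∈ gens, x < i) :
    PySem.Set.add gens i = gens ++ [i] := by
  have hm : i ∉ gens := fun hmem => lt_irrefl i (h i hmem)
  simp [PySem.Set.add, hm]

-- every position listed from index i is ≥ i
theorem pvPos_ge (n : Nat) : ∀ (i x : Int), x ∈ pvPos n i → i ≤ x := by
  induction n using Nat.strong_induction_on with
  | _ n ih =>
    intro i x hx
    rw [pvPos] at hx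
    by_cases h0 : n = 0
    · simp [h0] at hx
    · simp only [h0, if_false, List.mem_append] at hx
      rcases hx with hx | hx
      · split at hx
        · simp at hx; omega
        · simp at hx
      · have := ih (n / 2) (Nat.div_lt_self (Nat.pos_of_ne_zero h0) one_lt_two) (i + 1) x hx
        omega

-- the listed positions are strictly increasing
theorem pvPos_pairwise (n : Nat) : ∀ (i : Int), (pvPos n i).Pairwise (· < ·) := by
  induction n using Nat.strong_induction_on with
  | _ n ih =>
    intro i
    rw [pvPos]
    by_cases h0 : n = 0
    · simp [h0]
    · simp only [h0, if_false]
      refine List.pairwise_append.mpr ⟨?_, ih (n / 2) (Nat.div_lt_self (Nat.pos_of_ne_zero h0) one_lt_two) (i + 1), ?_⟩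
      · split <;> simp
      · intro x hx y hy
        split at hx
        · simp at hx
          have := pvPos_ge (n / 2) (i + 1) y hy
          omega
        · simp at hx

-- ---- bit-arithmetic facts for Kernighan's step, all via testBit ----
theorem pv_land_pred_odd (n : Nat) (h : n % 2 = 1) : n &&& (n - 1) = n - 1 := by
  apply Nat.eq_of_testBit_eq
  intro k
  rw [Nat.testBit_land]
  cases k with
  | zero =>
    have h1 : (n - 1) % 2 = 0 := by omega
    simp only [Nat.testBit_zero]
    rw [h, h1]
    decide
  | succ k =>
    simp only [Nat.testBit_succ]
    have h2 : (n - 1) / 2 = n / 2 := by omega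
    rw [h2, Bool.and_self]

theorem pv_xor_pred_odd (n : Nat) (h : n % 2 = 1) : n ^^^ (n - 1) = 1 := by
  apply Nat.eq_of_testBit_eq
  intro k
  rw [Nat.testBit_xor]
  cases k with
  | zero =>
    have h1 : (n - 1) % 2 = 0 := by omega
    simp only [Nat.testBit_zero]
    rw [h, h1]
    decide
  | succ k =>
    simp only [Nat.testBit_succ]
    have h2 : (n - 1) / 2 = n / 2 := by omega
    have h3 : (1 : Nat) / 2 = 0 := by norm_num
    rw [h2, h3, Bool.xor_self, Nat.zero_testBit]

theorem pv_land_pred_even (m : Nat) :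
    (2 * m) &&& (2 * m - 1) = 2 * (m &&& (m - 1)) := by
  apply Nat.eq_of_testBit_eq
  intro k
  rw [Nat.testBit_land]
  cases k with
  | zero =>
    simp only [Nat.testBit_zero]
    have h1 : (2 * m) % 2 = 0 := by omega
    rw [h1, (by omega : (2 * (m &&& (m - 1))) % 2 = 0)]
    simp
  | succ k =>
    simp only [Nat.testBit_succ]
    have h1 : (2 * m) / 2 = m := by omega
    have h2 : (2 * m - 1) / 2 = m - 1 := by omega
    have h3 : (2 * (m &&& (m - 1))) / 2 = m &&& (m - 1) := by omega
    rw [h1, h2, h3, Nat.testBit_land]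

theorem pv_xor_two_mul (m k : Nat) : (2 * m) ^^^ (2 * k) = 2 * (m ^^^ k) := by
  apply Nat.eq_of_testBit_eq
  intro j
  rw [Nat.testBit_xor]
  cases j with
  | zero =>
    simp only [Nat.testBit_zero]
    rw [(by omega : (2 * m) % 2 = 0), (by omega : (2 * k) % 2 = 0),
        (by omega : (2 * (m ^^^ k)) % 2 = 0)]
    decide
  | succ j =>
    simp only [Nat.testBit_succ]
    rw [(by omega : (2 * m) / 2 = m), (by omega : (2 * k) / 2 = k),
        (by omega : (2 * (m ^^^ k)) / 2 = m ^^^ k), Nat.testBit_xor]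

theorem pv_log2_two_mul (x : Nat) (hx : x ≠ 0) : Nat.log2 (2 * x) = Nat.log2 x + 1 := by
  rw [Nat.log2_eq_log_two, Nat.log2_eq_log_two, (by ring : 2 * x = x * 2),
      Nat.log_mul_base one_lt_two hx]

theorem pv_lowbit_ne_zero (n : Nat) (h : n ≠ 0) : n ^^^ (n &&& (n - 1)) ≠ 0 := by
  intro hzero
  have heq : n = n &&& (n - 1) := Nat.xor_eq_zero_iff.mp hzero
  have hle : n &&& (n - 1) ≤ n - 1 := Nat.and_le_right
  omega

-- shifting all bits up one position shifts the start index
theorem pvPos_two_mul (k : Nat) (i : Int) : pvPos (2 * k) i = pvPos k (i + 1) := by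
  by_cases hk : k = 0
  · rw [hk]; simp [pvPos]
  · rw [pvPos]
    have h0 : ¬ (2 * k = 0) := by omega
    have h2 : (2 * k) / 2 = k := by omega
    simp [h0, h2]

-- Kernighan's step on the canonical position list: the head is the lowest set bit's position
theorem pvPos_kernighan (n : Nat) : ∀ (i : Int), n ≠ 0 →
    pvPos n i = (((n ^^^ (n &&& (n - 1))).log2 : Int) + i) :: pvPos (n &&& (n - 1)) i := by
  induction n using Nat.strong_induction_on with
  | _ n ih =>
    intro i h0
    by_cases hodd : n % 2 = 1
    · rw [pvPos]
      simp only [h0, if_false, hodd, if_true, List.singleton_append]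
      rw [pv_land_pred_odd n hodd, pv_xor_pred_odd n hodd]
      have hl : Nat.log2 1 = 0 := by decide
      rw [hl]
      have htail : pvPos (n - 1) i = pvPos (n / 2) (i + 1) := by
        have : n - 1 = 2 * (n / 2) := by omega
        rw [this, pvPos_two_mul]
      rw [htail]
      norm_num
    · -- n even, n = 2*m with m ≠ 0
      have hm0 : n / 2 ≠ 0 := by omega
      have hn : n = 2 * (n / 2) := by omega
      set m := n / 2 with hmdef
      rw [pvPos]
      simp only [h0, if_false, hodd, if_false, List.nil_append]
      rw [ih m (by omega) (i + 1) hm0]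
      have e1 : n &&& (n - 1) = 2 * (m &&& (m - 1)) := by
        conv_lhs => rw [hn]
        exact pv_land_pred_even m
      have e2 : n ^^^ (n &&& (n - 1)) = 2 * (m ^^^ (m &&& (m - 1))) := by
        rw [e1]; conv_lhs => rw [hn]
        exact pv_xor_two_mul m (m &&& (m - 1))
      have e3 : (n ^^^ (n &&& (n - 1))).log2 = (m ^^^ (m &&& (m - 1))).log2 + 1 := by
        rw [e2]; exact pv_log2_two_mul _ (pv_lowbit_ne_zero m hm0)
      rw [e3, e1, pvPos_two_mul]
      congr 1
      push_cast
      ring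

-- B's loop appends the canonical position list
theorem pvLoopB_eq (n : Nat) : ∀ (gens : List Int),
    (∀ x ∈ gens, ∀ y ∈ pvPos n 1, x < y) → pvLoopB n gens = gens ++ pvPos n 1 := by
  induction n using Nat.strong_induction_on with
  | _ n ih =>
    intro gens h
    rw [pvLoopB]
    by_cases h0 : n = 0
    · simp [h0, pvPos]
    · simp only [h0, dif_neg, not_false_iff]
      have hk := pvPos_kernighan n 1 h0
      set rest := n &&& (n - 1) with hrest
      set p : Int := ((n ^^^ rest).log2 : Int) + 1 with hp
      have hlt : rest < n := lt_of_le_of_lt Nat.and_le_right (by omega)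
      have hpmem : p ∈ pvPos n 1 := by rw [hk]; exact List.mem_cons_self ..
      have hadd : PySem.Set.add gens p = gens ++ [p] :=
        pvSet_add_append gens p (fun x hx => h x hx p hpmem)
      rw [hadd, ih rest hlt (gens ++ [p]) ?_]
      · rw [hk, List.append_assoc]; rfl
      · intro x hx y hy
        rcases List.mem_append.mp hx with hx | hx
        · exact h x hx y (by rw [hk]; exact List.mem_cons_of_mem _ hy)
        · have hxp : x = p := by simpa using hx
          have hpw := pvPos_pairwise n 1
          rw [hk, List.pairwise_cons] at hpw
          rw [hxp]
          exact hpw.1 y hy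

-- A's fold over the enumerated reversed digit string, as an indexed recursion
def pvFoldA (cs : List Char) (i : Int) (gens : PySem.Set Int) : PySem.Set Int :=
  match cs with
  | [] => gens
  | c :: rest => pvFoldA rest (i + 1) (if c = '1' then PySem.Set.add gens (i + 1) else gens)

theorem pvFoldA_eq_foldl (cs : List Char) : ∀ (i : Int) (gens : PySem.Set Int),
    (PySem.List.enumerate cs i).foldl
      (fun (gens : PySem.Set Int) (p : Int × Char) =>
        if p.2 = '1' then PySem.Set.add gens (p.1 + 1) else gens) gens
    = pvFoldA cs i gens := by
  induction cs with
  | nil => intro i gens; simp [PySem.List.enumerate_nil, pvFoldA]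
  | cons c rest ih =>
    intro i gens
    rw [PySem.List.enumerate_cons, List.foldl_cons, ih, pvFoldA]

theorem pvFoldA_bits (n : Nat) : ∀ (i : Int) (gens : List Int), (∀ x ∈ gens, x < i + 1) →
    pvFoldA (pvBinDigits n).reverse i gens = gens ++ pvPos n (i + 1) := by
  induction n using Nat.strong_induction_on with
  | _ n ih =>
    intro i gens h
    rw [pvBinDigits, pvPos]
    by_cases h0 : n = 0
    · simp [h0, pvFoldA]
    · simp only [h0, if_false, List.reverse_append, List.reverse_singleton,
        List.singleton_append, pvFoldA]
      rw [ih (n / 2) (Nat.div_lt_self (Nat.pos_of_ne_zero h0) one_lt_two)]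
      · by_cases hb : n % 2 = 1
        · simp [hb, pvSet_add_append gens (i + 1) h, List.append_assoc]
        · simp [hb]
      · intro x hx
        split at hx
        · rw [pvSet_add_append gens (i + 1) h] at hx
          simp at hx
          rcases hx with hx | hx
          · exact lt_add_of_lt_of_pos (h x hx) one_pos
          · omega
        · exact lt_add_of_lt_of_pos (h x hx) one_pos

-- ===== VERDICT =====
theorem decode_gen_spec : Claim_equal_decode_gen := by
  intro gen _ hpre
  unfold Spec_decode_gen decode_gen decode_gen_alt
  have hneg : ¬ gen < 0 := not_lt.mpr hpre
  rw [pvBin]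
  simp only [hneg, if_false]
  by_cases h0 : gen.toNat = 0
  · simp [h0, PySem.List.enumerate_cons, PySem.List.enumerate_nil, pvLoopB]
  · simp only [h0, if_false, List.drop]
    rw [pvFoldA_eq_foldl, pvLoopB_eq gen.toNat [] (by simp)]
    exact pvFoldA_bits gen.toNat 0 [] (by simp)
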